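-- pv_equiv track=rewrite | github.com/jjm2473/music-conductor | backend/app/library.py | _format_from_mime
-- ===== SOURCE A (Python) =====
-- def _format_from_mime(mime_list: list[str]) -> tuple[str | None, str | None]:
--     normalized = [item.lower() for item in mime_list]
--
--     if any("audio/mpeg" in item for item in normalized):
--         return "MP3", "mp3"
--     if any("audio/flac" in item or "audio/x-flac" in item for item in normalized):
--         return "FLAC", "flac"
--     if any("audio/ogg" in item for item in normalized):
--         return "OGG/Vorbis", "ogg"
--     if any("audio/opus" in item for item in normalized):
--         return "Opus", "opus"
--     if any("audio/mp4" in item for item in normalized):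
--         return "M4A/MP4", "m4a"
--     if any("audio/aac" in item for item in normalized):
--         return "AAC", "aac"
--     if any("audio/x-ms-wma" in item or "audio/asf" in item for item in normalized):
--         return "WMA/ASF", "wma"
--     if any("audio/x-ape" in item for item in normalized):
--         return "APE", "ape"
--     if any("audio/wav" in item or "audio/x-wav" in item for item in normalized):
--         return "WAV", "wav"
--     if any("audio/aiff" in item or "audio/x-aiff" in item for item in normalized):
--         return "AIFF", "aiff"
--
--     return None, None
-- ===== SOURCE B (Python) =====
-- _TABLE = [
--     ("MP3", "mp3", ["audio/mpeg"]),
--     ("FLAC", "flac", ["audio/flac", "audio/x-flac"]),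
--     ("OGG/Vorbis", "ogg", ["audio/ogg"]),
--     ("Opus", "opus", ["audio/opus"]),
--     ("M4A/MP4", "m4a", ["audio/mp4"]),
--     ("AAC", "aac", ["audio/aac"]),
--     ("WMA/ASF", "wma", ["audio/x-ms-wma", "audio/asf"]),
--     ("APE", "ape", ["audio/x-ape"]),
--     ("WAV", "wav", ["audio/wav", "audio/x-wav"]),
--     ("AIFF", "aiff", ["audio/aiff", "audio/x-aiff"]),
-- ]
--
--
-- def _format_from_mime(mime_list):
--     best = None
--     for item in mime_list:
--         low = item.lower()
--         for i, (_label, _short, subs) in enumerate(_TABLE):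
--             if any(sub in low for sub in subs):
--                 if best is None or i < best:
--                     best = i
--                 break
--     if best is None:
--         return None, None
--     label, short, _subs = _TABLE[best]
--     return label, short
-- ===== Notes on version B (the rewrite author's own statement) =====
-- stated objective: alternative
-- what changed: Replaced A's ten sequential whole-list any-scans (one per format) by a priority-ordered (label, short, substrings) table and a single pass over the MIME list that keeps the minimum matching table index per item (inner table scan with break), indexing the table once at the end.
import Mathlib
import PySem

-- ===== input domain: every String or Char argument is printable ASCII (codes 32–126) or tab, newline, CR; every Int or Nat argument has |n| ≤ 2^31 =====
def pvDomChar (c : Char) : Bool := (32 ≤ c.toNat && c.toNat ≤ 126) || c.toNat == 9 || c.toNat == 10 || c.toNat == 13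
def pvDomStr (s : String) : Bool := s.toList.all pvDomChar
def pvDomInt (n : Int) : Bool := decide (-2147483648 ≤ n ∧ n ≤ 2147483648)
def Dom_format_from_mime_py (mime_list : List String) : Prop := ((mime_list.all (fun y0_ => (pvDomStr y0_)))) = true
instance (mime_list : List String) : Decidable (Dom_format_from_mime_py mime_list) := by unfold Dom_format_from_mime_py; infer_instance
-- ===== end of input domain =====

-- B replaces A's ten whole-list `any` scans by one pass over the list with a priority table and a
-- running minimum priority index (objective: alternative decomposition, same cost).

-- ===== PORT A =====
def format_from_mime_py (mime_list : List String) : Option String × Option String :=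
  let normalized := mime_list.map (fun item => PySem.Str.lower item)
  if normalized.any (fun item => PySem.Str.isIn "audio/mpeg" item) then (some "MP3", some "mp3")
  else if normalized.any (fun item => PySem.Str.isIn "audio/flac" item || PySem.Str.isIn "audio/x-flac" item) then (some "FLAC", some "flac")
  else if normalized.any (fun item => PySem.Str.isIn "audio/ogg" item) then (some "OGG/Vorbis", some "ogg")
  else if normalized.any (fun item => PySem.Str.isIn "audio/opus" item) then (some "Opus", some "opus")
  else if normalized.any (fun item => PySem.Str.isIn "audio/mp4" item) then (some "M4A/MP4", some "m4a")
  else if normalized.any (fun item => PySem.Str.isIn "audio/aac" item) then (some "AAC", some "aac")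
  else if normalized.any (fun item => PySem.Str.isIn "audio/x-ms-wma" item || PySem.Str.isIn "audio/asf" item) then (some "WMA/ASF", some "wma")
  else if normalized.any (fun item => PySem.Str.isIn "audio/x-ape" item) then (some "APE", some "ape")
  else if normalized.any (fun item => PySem.Str.isIn "audio/wav" item || PySem.Str.isIn "audio/x-wav" item) then (some "WAV", some "wav")
  else if normalized.any (fun item => PySem.Str.isIn "audio/aiff" item || PySem.Str.isIn "audio/x-aiff" item) then (some "AIFF", some "aiff")
  else (none, none)

-- ===== PORT B =====
-- the priority table of Source B: (label, short, substrings), earlier = higher priority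
def pvTable : List (String × String × List String) :=
  [ ("MP3", "mp3", ["audio/mpeg"]),
    ("FLAC", "flac", ["audio/flac", "audio/x-flac"]),
    ("OGG/Vorbis", "ogg", ["audio/ogg"]),
    ("Opus", "opus", ["audio/opus"]),
    ("M4A/MP4", "m4a", ["audio/mp4"]),
    ("AAC", "aac", ["audio/aac"]),
    ("WMA/ASF", "wma", ["audio/x-ms-wma", "audio/asf"]),
    ("APE", "ape", ["audio/x-ape"]),
    ("WAV", "wav", ["audio/wav", "audio/x-wav"]),
    ("AIFF", "aiff", ["audio/aiff", "audio/x-aiff"]) ]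

-- Source B's inner loop: first table index whose substrings match `low`, with break
def pvFirstIdx (low : String) : Option Nat :=
  pvTable.findIdx? (fun e => e.2.2.any (fun sub => PySem.Str.isIn sub low))

-- Source B's loop body: keep the smallest priority index seen so far
def pvStep (best : Option Nat) (item : String) : Option Nat :=
  match pvFirstIdx (PySem.Str.lower item) with
  | none => best
  | some i =>
      match best with
      | none => some i
      | some b => if i < b then some i else some b

def format_from_mime_py_alt (mime_list : List String) : Option String × Option String :=
  match mime_list.foldl pvStep none with
  | none => (none, none)
  | some b =>
      let e := pvTable.getD b ("", "", [])
      (some e.1, some e.2.1)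

-- ===== PRECONDITION & SPEC =====
def Spec_format_from_mime_py (mime_list : List String) (out : Option String × Option String) : Prop := out = format_from_mime_py_alt mime_list
instance (mime_list : List String) (out : Option String × Option String) : Decidable (Spec_format_from_mime_py mime_list out) := by unfold Spec_format_from_mime_py; infer_instance

-- ===== CLAIM (what is proved, stated in full; the proofs are below) =====
def Claim_equal_format_from_mime_py : Prop := ∀ (mime_list : List String), Dom_format_from_mime_py mime_list → Spec_format_from_mime_py mime_list (format_from_mime_py mime_list)

-- ===== LEMMAS AND PROOFS =====

-- test of table entry j against an already-lowercased string
def pvTest (j : Nat) (low : String) : Bool :=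
  (pvTable.getD j ("", "", [])).2.2.any (fun sub => PySem.Str.isIn sub low)

def pvF (s : String) : Option Nat := pvFirstIdx (PySem.Str.lower s)

def pvOmin (a b : Option Nat) : Option Nat :=
  match a, b with
  | none, b => b
  | some i, none => some i
  | some i, some j => some (min i j)

lemma pvStep_eq (best : Option Nat) (item : String) :
    pvStep best item = pvOmin best (pvF item) := by
  unfold pvStep pvF pvOmin
  cases pvFirstIdx (PySem.Str.lower item) with
  | none => cases best <;> rfl
  | some i =>
      cases best with
      | none => rfl
      | some b =>
          simp only []
          split_ifs with h <;> simp [Nat.min_def] <;> omega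

lemma pvOmin_assoc (a b c : Option Nat) : pvOmin (pvOmin a b) c = pvOmin a (pvOmin b c) := by
  cases a <;> cases b <;> cases c <;> simp [pvOmin, Nat.min_assoc]

lemma pvFoldl_eq (l : List String) : ∀ acc,
    l.foldl pvStep acc = pvOmin acc ((l.filterMap pvF).min?) := by
  induction l with
  | nil => intro acc; cases acc <;> rfl
  | cons x xs ih =>
      intro acc
      rw [List.foldl_cons, pvStep_eq, ih, pvOmin_assoc]
      congr 1
      rw [List.filterMap_cons]
      cases hx : pvF x with
      | none => simp [pvOmin]
      | some i =>
          rw [List.min?_cons]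
          cases hr : (xs.filterMap pvF).min? <;> simp [pvOmin, Option.elim]

lemma pvLen : pvTable.length = 10 := by decide

lemma pvF_eq_some_iff (s : String) (m : Nat) :
    pvF s = some m ↔ m < 10 ∧ pvTest m (PySem.Str.lower s) = true ∧
      ∀ j, j < m → pvTest j (PySem.Str.lower s) = false := by
  unfold pvF pvFirstIdx
  rw [List.findIdx?_eq_some_iff_getElem]
  constructor
  · rintro ⟨h, hp, hlt⟩
    rw [pvLen] at h
    refine ⟨h, ?_, ?_⟩
    · unfold pvTest; rw [List.getD_eq_getElem _ _ (by rw [pvLen]; omega)]; exact hp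
    · intro j hj
      have := hlt j hj
      unfold pvTest
      rw [List.getD_eq_getElem _ _ (by rw [pvLen]; omega)]
      simpa using this
  · rintro ⟨h, hp, hlt⟩
    refine ⟨by rw [pvLen]; omega, ?_, ?_⟩
    · unfold pvTest at hp; rwa [List.getD_eq_getElem _ _ (by rw [pvLen]; omega)] at hp
    · intro j hj
      have := hlt j hj
      unfold pvTest at this
      rw [List.getD_eq_getElem _ _ (by rw [pvLen]; omega)] at this
      simpa using this

lemma pvBest_none (l : List String)
    (h : ∀ j, j < 10 → ∀ s ∈ l, pvTest j (PySem.Str.lower s) = false) :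
    l.foldl pvStep none = none := by
  rw [pvFoldl_eq]
  have : l.filterMap pvF = [] := by
    rw [List.filterMap_eq_nil_iff]
    intro s hs
    cases hf : pvF s with
    | none => rfl
    | some m =>
        rw [pvF_eq_some_iff] at hf
        exact absurd (hf.2.1) (by simp [h m hf.1 s hs])
  rw [this]
  rfl

lemma pvBest_some (l : List String) (k : Nat) (hk : k < 10)
    (hlo : ∀ j, j < k → ∀ s ∈ l, pvTest j (PySem.Str.lower s) = false)
    (hex : ∃ s ∈ l, pvTest k (PySem.Str.lower s) = true) :
    l.foldl pvStep none = some k := by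
  rw [pvFoldl_eq]
  have hmin : (l.filterMap pvF).min? = some k := by
    rw [List.min?_eq_some_iff]
    constructor
    · obtain ⟨s, hs, hts⟩ := hex
      rw [List.mem_filterMap]
      refine ⟨s, hs, ?_⟩
      rw [pvF_eq_some_iff]
      exact ⟨hk, hts, fun j hj => hlo j hj s hs⟩
    · intro m hm
      rw [List.mem_filterMap] at hm
      obtain ⟨s, hs, hf⟩ := hm
      rw [pvF_eq_some_iff] at hf
      by_contra hlt
      have hmk : m < k := by omega
      have := hlo m hmk s hs
      rw [this] at hf
      exact absurd hf.2.1 (by simp)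
  rw [hmin]
  rfl

-- A's if-chain, with each condition rewritten through pvTest
lemma pvA_eq (l : List String) : format_from_mime_py l =
    (if l.any (fun s => pvTest 0 (PySem.Str.lower s)) then (some "MP3", some "mp3")
     else if l.any (fun s => pvTest 1 (PySem.Str.lower s)) then (some "FLAC", some "flac")
     else if l.any (fun s => pvTest 2 (PySem.Str.lower s)) then (some "OGG/Vorbis", some "ogg")
     else if l.any (fun s => pvTest 3 (PySem.Str.lower s)) then (some "Opus", some "opus")
     else if l.any (fun s => pvTest 4 (PySem.Str.lower s)) then (some "M4A/MP4", some "m4a")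
     else if l.any (fun s => pvTest 5 (PySem.Str.lower s)) then (some "AAC", some "aac")
     else if l.any (fun s => pvTest 6 (PySem.Str.lower s)) then (some "WMA/ASF", some "wma")
     else if l.any (fun s => pvTest 7 (PySem.Str.lower s)) then (some "APE", some "ape")
     else if l.any (fun s => pvTest 8 (PySem.Str.lower s)) then (some "WAV", some "wav")
     else if l.any (fun s => pvTest 9 (PySem.Str.lower s)) then (some "AIFF", some "aiff")
     else (none, none)) := by
  unfold format_from_mime_py pvTest pvTable
  simp [List.any_map, Function.comp]

-- ===== VERDICT (by name: the statement is the Claim_ definition above) =====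
theorem format_from_mime_py_spec : Claim_equal_format_from_mime_py := by
  intro l _
  unfold Spec_format_from_mime_py format_from_mime_py_alt
  rw [pvA_eq]
  by_cases h0 : (l.any fun s => pvTest 0 (PySem.Str.lower s)) = true
  · rw [pvBest_some l 0 (by omega) (by intro j hj; omega) (List.any_eq_true.mp h0)]
    simp [h0, pvTable]
  rw [Bool.not_eq_true] at h0
  by_cases h1 : (l.any fun s => pvTest 1 (PySem.Str.lower s)) = true
  · rw [pvBest_some l 1 (by omega) (by
      intro j hj s hs
      interval_cases j
      · simpa using List.any_eq_false.mp h0 s hs) (List.any_eq_true.mp h1)]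
    simp [h0, h1, pvTable]
  rw [Bool.not_eq_true] at h1
  by_cases h2 : (l.any fun s => pvTest 2 (PySem.Str.lower s)) = true
  · rw [pvBest_some l 2 (by omega) (by
      intro j hj s hs
      interval_cases j
      · simpa using List.any_eq_false.mp h0 s hs
      · simpa using List.any_eq_false.mp h1 s hs) (List.any_eq_true.mp h2)]
    simp [h0, h1, h2, pvTable]
  rw [Bool.not_eq_true] at h2
  by_cases h3 : (l.any fun s => pvTest 3 (PySem.Str.lower s)) = true
  · rw [pvBest_some l 3 (by omega) (by
      intro j hj s hs
      interval_cases j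
      · simpa using List.any_eq_false.mp h0 s hs
      · simpa using List.any_eq_false.mp h1 s hs
      · simpa using List.any_eq_false.mp h2 s hs) (List.any_eq_true.mp h3)]
    simp [h0, h1, h2, h3, pvTable]
  rw [Bool.not_eq_true] at h3
  by_cases h4 : (l.any fun s => pvTest 4 (PySem.Str.lower s)) = true
  · rw [pvBest_some l 4 (by omega) (by
      intro j hj s hs
      interval_cases j
      · simpa using List.any_eq_false.mp h0 s hs
      · simpa using List.any_eq_false.mp h1 s hs
      · simpa using List.any_eq_false.mp h2 s hs
      · simpa using List.any_eq_false.mp h3 s hs) (List.any_eq_true.mp h4)]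
    simp [h0, h1, h2, h3, h4, pvTable]
  rw [Bool.not_eq_true] at h4
  by_cases h5 : (l.any fun s => pvTest 5 (PySem.Str.lower s)) = true
  · rw [pvBest_some l 5 (by omega) (by
      intro j hj s hs
      interval_cases j
      · simpa using List.any_eq_false.mp h0 s hs
      · simpa using List.any_eq_false.mp h1 s hs
      · simpa using List.any_eq_false.mp h2 s hs
      · simpa using List.any_eq_false.mp h3 s hs
      · simpa using List.any_eq_false.mp h4 s hs) (List.any_eq_true.mp h5)]
    simp [h0, h1, h2, h3, h4, h5, pvTable]
  rw [Bool.not_eq_true] at h5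
  by_cases h6 : (l.any fun s => pvTest 6 (PySem.Str.lower s)) = true
  · rw [pvBest_some l 6 (by omega) (by
      intro j hj s hs
      interval_cases j
      · simpa using List.any_eq_false.mp h0 s hs
      · simpa using List.any_eq_false.mp h1 s hs
      · simpa using List.any_eq_false.mp h2 s hs
      · simpa using List.any_eq_false.mp h3 s hs
      · simpa using List.any_eq_false.mp h4 s hs
      · simpa using List.any_eq_false.mp h5 s hs) (List.any_eq_true.mp h6)]
    simp [h0, h1, h2, h3, h4, h5, h6, pvTable]
  rw [Bool.not_eq_true] at h6
  by_cases h7 : (l.any fun s => pvTest 7 (PySem.Str.lower s)) = true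
  · rw [pvBest_some l 7 (by omega) (by
      intro j hj s hs
      interval_cases j
      · simpa using List.any_eq_false.mp h0 s hs
      · simpa using List.any_eq_false.mp h1 s hs
      · simpa using List.any_eq_false.mp h2 s hs
      · simpa using List.any_eq_false.mp h3 s hs
      · simpa using List.any_eq_false.mp h4 s hs
      · simpa using List.any_eq_false.mp h5 s hs
      · simpa using List.any_eq_false.mp h6 s hs) (List.any_eq_true.mp h7)]
    simp [h0, h1, h2, h3, h4, h5, h6, h7, pvTable]
  rw [Bool.not_eq_true] at h7
  by_cases h8 : (l.any fun s => pvTest 8 (PySem.Str.lower s)) = true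
  · rw [pvBest_some l 8 (by omega) (by
      intro j hj s hs
      interval_cases j
      · simpa using List.any_eq_false.mp h0 s hs
      · simpa using List.any_eq_false.mp h1 s hs
      · simpa using List.any_eq_false.mp h2 s hs
      · simpa using List.any_eq_false.mp h3 s hs
      · simpa using List.any_eq_false.mp h4 s hs
      · simpa using List.any_eq_false.mp h5 s hs
      · simpa using List.any_eq_false.mp h6 s hs
      · simpa using List.any_eq_false.mp h7 s hs) (List.any_eq_true.mp h8)]
    simp [h0, h1, h2, h3, h4, h5, h6, h7, h8, pvTable]
  rw [Bool.not_eq_true] at h8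
  by_cases h9 : (l.any fun s => pvTest 9 (PySem.Str.lower s)) = true
  · rw [pvBest_some l 9 (by omega) (by
      intro j hj s hs
      interval_cases j
      · simpa using List.any_eq_false.mp h0 s hs
      · simpa using List.any_eq_false.mp h1 s hs
      · simpa using List.any_eq_false.mp h2 s hs
      · simpa using List.any_eq_false.mp h3 s hs
      · simpa using List.any_eq_false.mp h4 s hs
      · simpa using List.any_eq_false.mp h5 s hs
      · simpa using List.any_eq_false.mp h6 s hs
      · simpa using List.any_eq_false.mp h7 s hs
      · simpa using List.any_eq_false.mp h8 s hs) (List.any_eq_true.mp h9)]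
    simp [h0, h1, h2, h3, h4, h5, h6, h7, h8, h9, pvTable]
  rw [Bool.not_eq_true] at h9
  rw [pvBest_none l (by
    intro j hj s hs
    interval_cases j
    · simpa using List.any_eq_false.mp h0 s hs
    · simpa using List.any_eq_false.mp h1 s hs
    · simpa using List.any_eq_false.mp h2 s hs
    · simpa using List.any_eq_false.mp h3 s hs
    · simpa using List.any_eq_false.mp h4 s hs
    · simpa using List.any_eq_false.mp h5 s hs
    · simpa using List.any_eq_false.mp h6 s hs
    · simpa using List.any_eq_false.mp h7 s hs
    · simpa using List.any_eq_false.mp h8 s hs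
    · simpa using List.any_eq_false.mp h9 s hs)]
  simp [h0, h1, h2, h3, h4, h5, h6, h7, h8, h9]
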